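-- pv_equiv track=rewrite | github.com/atooms-mirror/atooms | atooms/trajectory/utils.py | get_block_size
-- ===== SOURCE A (Python) =====
-- def get_block_size(data):
--     """
--     Return the size of the periodic block after which entries in
--     `data` repeat. It is used to determine the block size in
--     trajectories with logarithmic time spacing.
--     """
--     if len(data) < 2:
--         return 1
--     delta_old = 0
--     delta_one = data[1] - data[0]
--     iold = data[0]
--     period = 1
--     for ii in range(1, len(data)):
--         i = data[ii]
--         delta = i-iold
--         # If we find that we repeat the increment between entries is
--         # smaller than the previous iteration and it gets back to the
--         # initial one (delat_one) then we found a block. We must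
--         # correct the +1 overshoot thus we subtract -1 to period
--         if delta < delta_old and delta == delta_one:
--             return period - 1
--         else:
--             period += 1
--             iold = i
--             delta_old = delta
--
--     # We got to the end of the trajectory
--     if len(data) != period:
--         raise ValueError('something went wrong in block analysis')
--     if data[1]-data[0] == data[-1]-data[-2]:
--         # If the difference between steps is constant (euristically)
--         # the period is one
--         return 1
--     else:
--         # There is no periodicity, the block size is the whole trajectory
--         return period
-- ===== SOURCE B (Python) =====
-- def get_block_size(data):
--     n = len(data)
--     if n < 2:
--         return 1
--     deltas = [data[i + 1] - data[i] for i in range(n - 1)]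
--     d0 = deltas[0]
--     # scan only the occurrences of the first difference, found by list.index,
--     # and check the predecessor by random access instead of threading running state
--     start = 0
--     while True:
--         try:
--             k = deltas.index(d0, start)
--         except ValueError:
--             break
--         prev = 0 if k == 0 else deltas[k - 1]
--         if d0 < prev:
--             return k
--         start = k + 1
--     return 1 if d0 == deltas[-1] else n
-- ===== Notes on version B (the rewrite author's own statement) =====
-- stated objective: alternative
-- what changed: B precomputes the difference list and then, instead of A's stateful scan of every difference with four running variables, repeatedly jumps with list.index to the next occurrence of the first difference and checks its predecessor by random access; the tail test compares deltas[0] with deltas[-1] directly.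
import Mathlib
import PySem

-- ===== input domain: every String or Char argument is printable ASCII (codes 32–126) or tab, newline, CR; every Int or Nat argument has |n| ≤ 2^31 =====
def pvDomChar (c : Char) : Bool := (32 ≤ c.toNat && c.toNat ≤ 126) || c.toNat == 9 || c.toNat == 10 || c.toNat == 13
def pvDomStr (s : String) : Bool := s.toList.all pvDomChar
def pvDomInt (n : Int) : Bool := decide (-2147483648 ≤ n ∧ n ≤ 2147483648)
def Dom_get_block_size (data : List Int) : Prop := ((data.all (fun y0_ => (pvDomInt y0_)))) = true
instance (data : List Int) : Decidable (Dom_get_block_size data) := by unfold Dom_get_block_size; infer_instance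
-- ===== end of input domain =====

-- B replaces A's stateful scan of every difference by index-jumps to the occurrences of the
-- first difference, checking each occurrence's predecessor by random access; same O(n) cost.

-- ===== PORT A =====
-- A's for-loop over data[1:] with state (iold, delta_old, period); Sum.inl = early return (period - 1),
-- Sum.inr = loop finished with final period.
def pvLoopA (d1 : Int) : List Int → Int → Int → Int → Int ⊕ Int
  | [], _, _, period => Sum.inr period
  | i :: rest, iold, delta_old, period =>
    let delta := i - iold
    if delta < delta_old ∧ delta = d1 then Sum.inl (period - 1)
    else pvLoopA d1 rest i delta (period + 1)

def get_block_size (data : List Int) : Int :=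
  if data.length < 2 then 1
  else
    let d1 := PySem.List.pyGetD data 1 0 - PySem.List.pyGetD data 0 0
    match pvLoopA d1 (data.drop 1) (PySem.List.pyGetD data 0 0) 0 1 with
    | Sum.inl r => r
    | Sum.inr period =>
      -- Python raises ValueError on this branch; it is unreachable (the loop adds 1 per element),
      -- so the returned 0 is never produced.
      if (data.length : Int) ≠ period then 0
      else if PySem.List.pyGetD data 1 0 - PySem.List.pyGetD data 0 0
              = PySem.List.pyGetD data (-1) 0 - PySem.List.pyGetD data (-2) 0 then 1
      else period

-- ===== PORT B =====
-- deltas = [data[i+1] - data[i] for i in range(n-1)]  (indices are in range, so pyGetD is exact)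
def pvDeltasB (data : List Int) : List Int :=
  (PySem.List.pyRange 0 ((data.length : Int) - 1) 1).map
    (fun i => PySem.List.pyGetD data (i + 1) 0 - PySem.List.pyGetD data i 0)

-- deltas.index(v, start) for 0 ≤ start: first index ≥ start holding v (none = ValueError); exact by hand.
def pvIndexFrom (xs : List Int) (v : Int) (start : Nat) : Option Nat :=
  (PySem.List.index? (xs.drop start) v).map (· + start)

lemma pvIndexFrom_lt {xs : List Int} {v : Int} {start k : Nat}
    (h : pvIndexFrom xs v start = some k) : start ≤ k ∧ k < xs.length := by
  unfold pvIndexFrom at h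
  cases hj : PySem.List.index? (xs.drop start) v with
  | none => rw [hj] at h; simp at h
  | some j =>
    rw [hj] at h
    simp only [Option.map_some, Option.some.injEq] at h
    obtain ⟨hk, _, _⟩ := PySem.List.getElem_of_index?_eq_some hj
    have hl : (xs.drop start).length = xs.length - start := List.length_drop
    omega

-- B's while-True loop: repeated index-jumps to the next occurrence of d0
def pvSearchB (deltas : List Int) (d0 : Int) (start : Nat) : Option Nat :=
  match h : pvIndexFrom deltas d0 start with
  | none => none
  | some k =>
    let prev := if k = 0 then 0 else PySem.List.pyGetD deltas ((k : Int) - 1) 0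
    if d0 < prev then some k else pvSearchB deltas d0 (k + 1)
termination_by deltas.length - start
decreasing_by
  have := pvIndexFrom_lt h
  omega

def get_block_size_alt (data : List Int) : Int :=
  if data.length < 2 then 1
  else
    let deltas := pvDeltasB data
    let d0 := PySem.List.pyGetD deltas 0 0
    match pvSearchB deltas d0 0 with
    | some k => (k : Int)
    | none => if d0 = PySem.List.pyGetD deltas (-1) 0 then 1 else (data.length : Int)

-- ===== PRECONDITION & SPEC =====
def Spec_get_block_size (data : List Int) (out : Int) : Prop := out = get_block_size_alt data
instance (data : List Int) (out : Int) : Decidable (Spec_get_block_size data out) := by unfold Spec_get_block_size; infer_instance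

-- ===== CLAIM =====
def Claim_equal_get_block_size : Prop := ∀ (data : List Int), Dom_get_block_size data → Spec_get_block_size data (get_block_size data)

-- ===== LEMMAS AND PROOFS =====

-- reference scan over the difference list, with explicit previous difference and Nat index
def pvScan (d0 : Int) : List Int → Int → Nat → Option Nat
  | [], _, _ => none
  | d :: rest, prev, k => if d < prev ∧ d = d0 then some k else pvScan d0 rest d (k + 1)

-- A's running loop equals the reference scan over the consecutive differences of (iold :: rest).
lemma pvLoopA_eq_scan (d1 : Int) (rest : List Int) : ∀ (iold prev : Int) (k : Nat),
    pvLoopA d1 rest iold prev ((k : Int) + 1) =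
      match pvScan d1 (List.zipWith (fun a b => b - a) (iold :: rest) rest) prev k with
      | some j => Sum.inl (j : Int)
      | none => Sum.inr ((k : Int) + 1 + rest.length) := by
  induction rest with
  | nil => intro iold prev k; simp [pvLoopA, pvScan]
  | cons i rest ih =>
    intro iold prev k
    simp only [List.zipWith, pvLoopA, pvScan]
    by_cases h : i - iold < prev ∧ i - iold = d1
    · rw [if_pos h, if_pos h]; simp
    · rw [if_neg h, if_neg h]
      have h1 : ((k : Int) + 1) + 1 = ((k + 1 : Nat) : Int) + 1 := by push_cast; ring
      rw [h1, ih i (i - iold) (k + 1)]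
      cases hs : pvScan d1 (List.zipWith (fun a b => b - a) (i :: rest) rest) (i - iold) (k + 1) with
      | none => simp only [Sum.inr.injEq, List.length_cons]; push_cast; omega
      | some j => rfl

-- non-dependent unfolding equation for pvSearchB
lemma pvSearchB_eq (deltas : List Int) (d0 : Int) (start : Nat) :
    pvSearchB deltas d0 start =
      match pvIndexFrom deltas d0 start with
      | none => none
      | some k =>
        if d0 < (if k = 0 then 0 else PySem.List.pyGetD deltas ((k : Int) - 1) 0) then some k
        else pvSearchB deltas d0 (k + 1) := by
  rw [pvSearchB]
  cases h : pvIndexFrom deltas d0 start <;> simp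

-- the reference scan equals B's index-jumping search
lemma pvScan_eq_search (deltas : List Int) (d0 : Int) : ∀ (start : Nat),
    start ≤ deltas.length →
    pvScan d0 (deltas.drop start) (if start = 0 then 0 else deltas.getD (start - 1) 0) start
      = pvSearchB deltas d0 start := by
  intro start
  induction hfuel : deltas.length - start using Nat.strong_induction_on generalizing start with
  | _ fuel ih =>
  intro hle
  rw [pvSearchB_eq]
  cases hdrop : deltas.drop start with
  | nil =>
    have hidx : pvIndexFrom deltas d0 start = none := by
      unfold pvIndexFrom; rw [hdrop]; rfl
    rw [hidx]; simp [pvScan]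
  | cons d rest =>
    have hlen : (deltas.drop start).length = deltas.length - start := List.length_drop
    rw [hdrop] at hlen
    have hstartlt : start < deltas.length := by simp at hlen; omega
    have hd? : deltas[start]? = some d := by
      have h0 : (deltas.drop start)[0]? = some d := by rw [hdrop]; rfl
      rw [List.getElem?_drop] at h0
      simpa using h0
    have hrest : deltas.drop (start + 1) = rest := by
      rw [← List.drop_drop, hdrop]; rfl
    have hrec := ih (deltas.length - (start + 1)) (by omega) (start + 1) rfl (by omega)
    rw [hrest] at hrec
    have hprevrec : pvScan d0 rest (if start + 1 = 0 then 0 else deltas.getD (start + 1 - 1) 0) (start + 1)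
        = pvScan d0 rest d (start + 1) := by
      simp [List.getD_eq_getElem?_getD, hd?]
    rw [hprevrec] at hrec
    by_cases hdd : d = d0
    · -- occurrence at start
      have hidx : pvIndexFrom deltas d0 start = some start := by
        unfold pvIndexFrom
        rw [hdrop, hdd, PySem.List.index?_cons_self]
        simp
      rw [hidx]
      simp only [pvScan]
      have hprev : (if start = 0 then (0 : Int) else PySem.List.pyGetD deltas ((start : Int) - 1) 0)
          = (if start = 0 then (0 : Int) else deltas.getD (start - 1) 0) := by
        by_cases h0 : start = 0
        · simp [h0]
        · have h1 : ((start : Int) - 1) = ((start - 1 : Nat) : Int) := by omega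
          rw [if_neg h0, if_neg h0, h1, PySem.List.pyGetD_natCast]
      rw [hprev]
      by_cases hlt : d0 < (if start = 0 then (0 : Int) else deltas.getD (start - 1) 0)
      · have hcond : (d < (if start = 0 then (0 : Int) else deltas.getD (start - 1) 0)) ∧ d = d0 :=
          ⟨by rw [hdd]; exact hlt, hdd⟩
        rw [if_pos hcond, if_pos hlt]
      · have hcond : ¬ ((d < (if start = 0 then (0 : Int) else deltas.getD (start - 1) 0)) ∧ d = d0) :=
          fun hO => hlt (hO.2 ▸ hO.1)
        rw [if_neg hcond, if_neg hlt]
        exact hrec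
    · -- no occurrence at start: both skip to start + 1
      have hidx : pvIndexFrom deltas d0 start = pvIndexFrom deltas d0 (start + 1) := by
        unfold pvIndexFrom
        rw [hdrop, hrest, PySem.List.index?_cons_of_ne rest hdd]
        cases PySem.List.index? rest d0 with
        | none => rfl
        | some j => simp only [Option.map_some, Option.some.injEq]; omega
      have hcond : ¬ ((d < (if start = 0 then (0 : Int) else deltas.getD (start - 1) 0)) ∧ d = d0) :=
          fun hO => hdd hO.2
      simp only [pvScan, if_neg hcond]
      rw [hidx, ← pvSearchB_eq]
      exact hrec

-- the comprehension over range(n-1) equals zipWith over the list and its tail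
lemma pvDeltas_zip_aux : ∀ (data : List Int),
    (List.range (data.length - 1)).map (fun k => data.getD (k + 1) 0 - data.getD k 0)
      = List.zipWith (fun a b => b - a) data data.tail := by
  intro data
  match data with
  | [] => rfl
  | [a] => rfl
  | a :: b :: rest =>
    have ih := pvDeltas_zip_aux (b :: rest)
    simp only [List.length_cons, Nat.add_sub_cancel, List.tail_cons] at ih ⊢
    rw [List.range_succ_eq_map]
    simp only [List.map_cons, List.map_map, List.zipWith]
    apply List.cons_eq_cons.mpr
    refine ⟨by simp [List.getD], ?_⟩
    · rw [← ih]
      apply List.map_congr_left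
      intro k _
      simp [List.getD]

lemma pvDeltasB_eq_zip (data : List Int) :
    pvDeltasB data = List.zipWith (fun a b => b - a) data data.tail := by
  cases data with
  | nil => simp [pvDeltasB, PySem.List.pyRange_one_eq_nil (by norm_num : (-1 : Int) ≤ 0)]
  | cons x xs =>
    unfold pvDeltasB
    have h1 : (((x :: xs).length : Int) - 1) = (((x :: xs).length - 1 : Nat) : Int) := by
      simp
    rw [h1, PySem.List.pyRange_zero_natCast, List.map_map]
    rw [← pvDeltas_zip_aux (x :: xs)]
    apply List.map_congr_left
    intro k _
    have h2 : ((k : Int) + 1) = (((k + 1 : Nat)) : Int) := by push_cast; ring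
    simp only [Function.comp_apply, h2, PySem.List.pyGetD_natCast]

lemma pvGetD_neg_one_cons (x : Int) (xs : List Int) (h : xs ≠ []) :
    PySem.List.pyGetD (x :: xs) (-1) 0 = PySem.List.pyGetD xs (-1) 0 := by
  rw [PySem.List.pyGetD_neg_one (x :: xs) 0 (List.cons_ne_nil x xs), PySem.List.pyGetD_neg_one xs 0 h]
  exact List.getLast_cons h

lemma pvGetD_neg_two_cons (x : Int) (xs : List Int) (h : 2 ≤ xs.length) :
    PySem.List.pyGetD (x :: xs) (-2) 0 = PySem.List.pyGetD xs (-2) 0 := by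
  rw [PySem.List.pyGetD_neg_ofNat (x :: xs) 2 0 (by omega) (by simp; omega),
      PySem.List.pyGetD_neg_ofNat xs 2 0 (by omega) (by omega)]
  have hi : (x :: xs).length - 2 = (xs.length - 2) + 1 := by simp; omega
  simp only [hi, List.getElem_cons_succ]

-- deltas[-1] = data[-1] - data[-2]
lemma pvLastDelta (rest : List Int) : ∀ (a b : Int),
    PySem.List.pyGetD (List.zipWith (fun x y => y - x) (a :: b :: rest) (b :: rest)) (-1) 0
    = PySem.List.pyGetD (a :: b :: rest) (-1) 0 - PySem.List.pyGetD (a :: b :: rest) (-2) 0 := by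
  induction rest with
  | nil =>
    intro a b
    simp [PySem.List.pyGetD, PySem.List.pyGet?, PySem.List.pyIdx?]
  | cons c rest ih =>
    intro a b
    have hz : List.zipWith (fun x y => y - x) (a :: b :: c :: rest) (b :: c :: rest)
        = (b - a) :: List.zipWith (fun x y => y - x) (b :: c :: rest) (c :: rest) := by
      simp [List.zipWith]
    rw [hz, pvGetD_neg_one_cons _ _ (by simp [List.zipWith]),
        pvGetD_neg_one_cons a _ (by simp),
        pvGetD_neg_two_cons a _ (by simp)]
    exact ih b c

-- ===== VERDICT =====
theorem get_block_size_spec : Claim_equal_get_block_size := by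
  intro data _
  unfold Spec_get_block_size
  match data with
  | [] => rfl
  | [a] => rfl
  | a :: b :: rest =>
    have hlen : ¬ (a :: b :: rest).length < 2 := by simp
    simp only [get_block_size, get_block_size_alt, if_neg hlen]
    have hzw : List.zipWith (fun x y => y - x) (a :: b :: rest) (b :: rest)
        = (b - a) :: List.zipWith (fun x y => y - x) (b :: rest) rest := by simp [List.zipWith]
    have hzip : pvDeltasB (a :: b :: rest) = (b - a) :: List.zipWith (fun x y => y - x) (b :: rest) rest := by
      rw [pvDeltasB_eq_zip]; simp
    have h0 : PySem.List.pyGetD (a :: b :: rest) 0 0 = a := by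
      simp [PySem.List.pyGetD_zero_cons]
    have h1 : PySem.List.pyGetD (a :: b :: rest) 1 0 = b := by
      simp [pysem]
    have hd0 : PySem.List.pyGetD (pvDeltasB (a :: b :: rest)) 0 0 = b - a := by
      rw [hzip]; simp [PySem.List.pyGetD_zero_cons]
    simp only [h0, h1, hd0]
    have hdrop : (a :: b :: rest).drop 1 = b :: rest := rfl
    have hA := pvLoopA_eq_scan (b - a) (b :: rest) a 0 0
    simp only [Nat.cast_zero, zero_add] at hA
    rw [hdrop, hA]
    have hsearch := pvScan_eq_search (pvDeltasB (a :: b :: rest)) (b - a) 0 (by omega)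
    norm_num at hsearch
    rw [hzip] at hsearch
    rw [hzw, hsearch, ← hzip]
    cases hs : pvSearchB (pvDeltasB (a :: b :: rest)) (b - a) 0 with
    | some k => simp
    | none =>
      simp only []
      have hne : ¬ (((a :: b :: rest).length : Int) ≠ 1 + ((b :: rest).length : Int)) := by
        simp only [List.length_cons]; push_cast; omega
      rw [if_neg hne]
      have hlast := pvLastDelta rest a b
      rw [hzip, ← hzw, ← hlast]
      by_cases hc : b - a = PySem.List.pyGetD (List.zipWith (fun x y => y - x) (a :: b :: rest) (b :: rest)) (-1) 0
      · rw [if_pos hc, if_pos hc]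
      · rw [if_neg hc, if_neg hc]
        simp only [List.length_cons]; push_cast; omega
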